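-- pv_equiv track=rewrite | github.com/dhruvldrp9/C-To-Python-Agent | c2py-agent/core/parser/c_preprocessor.py | _process_conditionals
-- ===== SOURCE A (Python) =====
-- def _process_conditionals(source: str) -> str:
--     """
--     Process conditional compilation directives (#if, #ifdef, etc.).
--
--     Args:
--         source: C source code as string
--
--     Returns:
--         Processed source code with conditionals evaluated
--     """
--     # This is a simplified implementation. A full implementation would need to
--     # properly evaluate conditions and handle nested conditionals.
--     lines = source.split('\n')
--     processed_lines = []
--     skip_until_endif = False
--
--     for line in lines:
--         if skip_until_endif:
--             if line.strip().startswith('#endif'):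
--                 skip_until_endif = False
--             continue
--
--         if line.strip().startswith(('#if', '#ifdef', '#ifndef')):
--             # For now, we'll just skip conditional blocks
--             skip_until_endif = True
--             continue
--
--         processed_lines.append(line)
--
--     return '\n'.join(processed_lines)
-- ===== SOURCE B (Python) =====
-- def _process_conditionals(source: str) -> str:
--     lines = source.split('\n')
--     out = []
--     i = 0
--     n = len(lines)
--     while i < n:
--         line = lines[i]
--         i += 1
--         if line.strip().startswith('#if'):
--             # inner loop: advance past lines until the first '#endif' line is consumed
--             while i < n and not lines[i].strip().startswith('#endif'):
--                 i += 1
--             i += 1  # consume the '#endif' line (or run off the end)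
--         else:
--             out.append(line)
--     return '\n'.join(out)
-- ===== Notes on version B (the rewrite author's own statement) =====
-- stated objective: alternative
-- what changed: Replaced the flag-carrying single fold (a skip_until_endif boolean threaded through every line) with an index-driven outer loop that, on an '#if' line, runs an inner find-and-consume loop discarding lines up to and including the first '#endif'.
import Mathlib
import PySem

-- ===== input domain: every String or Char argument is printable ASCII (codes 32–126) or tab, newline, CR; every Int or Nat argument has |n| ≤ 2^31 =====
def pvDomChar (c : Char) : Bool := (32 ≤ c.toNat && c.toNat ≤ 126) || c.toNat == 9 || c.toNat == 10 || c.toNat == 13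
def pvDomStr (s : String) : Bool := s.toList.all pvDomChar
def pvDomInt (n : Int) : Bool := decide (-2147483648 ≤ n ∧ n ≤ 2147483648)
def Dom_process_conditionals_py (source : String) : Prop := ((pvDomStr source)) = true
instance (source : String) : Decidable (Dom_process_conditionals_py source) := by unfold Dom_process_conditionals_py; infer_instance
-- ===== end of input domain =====

-- B replaces A's flag-threaded single pass by an index/consume two-level loop (alternative decomposition, same cost).

-- ===== PORT A =====
-- one loop step of A: state = (processed_lines, skip_until_endif)
def pvStepA (st : List String × Bool) (line : String) : List String × Bool :=
  if st.2 then
    if PySem.Str.startswith (PySem.Str.strip line) "#endif" then (st.1, false) else st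
  else if PySem.Str.startswith (PySem.Str.strip line) "#if"
       || PySem.Str.startswith (PySem.Str.strip line) "#ifdef"
       || PySem.Str.startswith (PySem.Str.strip line) "#ifndef" then
    (st.1, true)
  else
    (st.1 ++ [line], st.2)

def process_conditionals_py (source : String) : String :=
  PySem.Str.join "\n" ((((PySem.Str.split? source "\n").getD []).foldl pvStepA ([], false)).1)

-- ===== PORT B =====
-- inner while: discard lines up to and including the first '#endif' line
def pvSkipB : List String → List String
  | [] => []
  | l :: rest =>
    if PySem.Str.startswith (PySem.Str.strip l) "#endif" then rest else pvSkipB rest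

theorem pvSkipB_length_le : ∀ ls : List String, (pvSkipB ls).length ≤ ls.length := by
  intro ls
  induction ls with
  | nil => simp [pvSkipB]
  | cons l rest ih =>
    simp only [pvSkipB]
    split
    · simp
    · exact Nat.le_succ_of_le ih

-- outer while over the remaining lines
def pvGoB : List String → List String
  | [] => []
  | l :: rest =>
    if PySem.Str.startswith (PySem.Str.strip l) "#if" then pvGoB (pvSkipB rest)
    else l :: pvGoB rest
termination_by ls => ls.length
decreasing_by
  · exact Nat.lt_succ_of_le (pvSkipB_length_le rest)
  · simp

def process_conditionals_py_alt (source : String) : String :=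
  PySem.Str.join "\n" (pvGoB ((PySem.Str.split? source "\n").getD []))

-- ===== PRECONDITION & SPEC =====
def Spec_process_conditionals_py (source : String) (out : String) : Prop := out = process_conditionals_py_alt source
instance (source : String) (out : String) : Decidable (Spec_process_conditionals_py source out) := by unfold Spec_process_conditionals_py; infer_instance

-- ===== CLAIM (what is proved, stated in full; the proofs are below) =====
def Claim_equal_process_conditionals_py : Prop := ∀ (source : String), Dom_process_conditionals_py source → Spec_process_conditionals_py source (process_conditionals_py source)

-- ===== LEMMAS AND PROOFS =====

-- '#ifdef'/'#ifndef' prefixes imply the '#if' prefix, so A's triple test equals B's single test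
theorem pvIfTriple (s : List Char) :
    (PySem.Chars.startswith s "#if".toList || PySem.Chars.startswith s "#ifdef".toList
      || PySem.Chars.startswith s "#ifndef".toList) = PySem.Chars.startswith s "#if".toList := by
  cases h : PySem.Chars.startswith s "#if".toList with
  | true => simp
  | false =>
    have hb : PySem.Chars.startswith s "#ifdef".toList = false := by
      rw [Bool.eq_false_iff]
      intro hb
      have hp := (PySem.Chars.startswith_iff _ _).mp hb
      have h3 : "#if".toList <+: s := List.IsPrefix.trans (by decide) hp
      rw [(PySem.Chars.startswith_iff _ _).mpr h3] at h
      simp at h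
    have hc : PySem.Chars.startswith s "#ifndef".toList = false := by
      rw [Bool.eq_false_iff]
      intro hc
      have hp := (PySem.Chars.startswith_iff _ _).mp hc
      have h3 : "#if".toList <+: s := List.IsPrefix.trans (by decide) hp
      rw [(PySem.Chars.startswith_iff _ _).mpr h3] at h
      simp at h
    rw [hb, hc]
    simp

-- with skip flag set, A's fold consumes through the first '#endif' line, i.e. runs on pvSkipB
theorem pvFoldSkip (ls : List String) (acc : List String) :
    (List.foldl pvStepA (acc, true) ls).1 = (List.foldl pvStepA (acc, false) (pvSkipB ls)).1 := by
  induction ls generalizing acc with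
  | nil => simp [pvSkipB]
  | cons l rest ih =>
    simp only [pvSkipB, List.foldl, pvStepA, PySem.Str.startswith_eq, PySem.Str.toList_strip]
    by_cases h : PySem.Chars.startswith (PySem.Chars.strip l.toList) "#endif".toList = true
    · rw [if_pos h, if_pos h]
      simp
    · rw [if_neg h, if_neg h]
      exact ih acc

-- A's fold from a clear flag computes acc ++ pvGoB
theorem pvFoldMain : ∀ ls acc, (List.foldl pvStepA (acc, false) ls).1 = acc ++ pvGoB ls := by
  intro ls
  induction hn : ls.length using Nat.strong_induction_on generalizing ls with
  | _ n ih =>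
    cases ls with
    | nil => intro acc; simp [pvGoB]
    | cons l rest =>
      intro acc
      have hgo : pvGoB (l :: rest) =
          if PySem.Chars.startswith (PySem.Chars.strip l.toList) "#if".toList = true
          then pvGoB (pvSkipB rest) else l :: pvGoB rest := by
        simp only [pvGoB, PySem.Str.startswith_eq, PySem.Str.toList_strip]
      have hstep : pvStepA (acc, false) l =
          if PySem.Chars.startswith (PySem.Chars.strip l.toList) "#if".toList = true
          then (acc, true) else (acc ++ [l], false) := by
        simp only [pvStepA, PySem.Str.startswith_eq, PySem.Str.toList_strip]
        rw [if_neg (by simp)]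
        rw [pvIfTriple]
      by_cases h : PySem.Chars.startswith (PySem.Chars.strip l.toList) "#if".toList = true
      · rw [hgo, if_pos h]
        simp only [List.foldl, hstep, if_pos h]
        rw [pvFoldSkip]
        exact ih (pvSkipB rest).length (by
          subst hn; exact Nat.lt_succ_of_le (pvSkipB_length_le rest)) _ rfl acc
      · rw [hgo, if_neg h]
        simp only [List.foldl, hstep, if_neg h]
        rw [ih rest.length (by subst hn; simp) _ rfl]
        simp

-- ===== VERDICT (by name: the statement is the Claim_ definition above) =====
theorem process_conditionals_py_spec : Claim_equal_process_conditionals_py := by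
  intro source _
  unfold Spec_process_conditionals_py process_conditionals_py process_conditionals_py_alt
  rw [pvFoldMain]
  simp
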